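-- pv_equiv track=rewrite | github.com/minjeong03/exercise | python/source/piece_parser.py | parse_shape_matrix_from_string
-- ===== SOURCE A (Python) =====
-- def parse_shape_matrix_from_string(str):
--     result = []
--     current = []
--     for char in str:
--         if char == "\n":
--             result.append(current)
--             current = []
--         elif char == "0":
--             current.append(0)
--         elif char == "1":
--             current.append(1)
--     return result
-- ===== SOURCE B (Python) =====
-- def parse_shape_matrix_from_string(str):
--     i = str.find("\n")
--     if i == -1:
--         return []
--     return [[1 if c == "1" else 0 for c in str[:i] if c in "01"]] \
--         + parse_shape_matrix_from_string(str[i + 1:])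
-- ===== Notes on version B (the rewrite author's own statement) =====
-- stated objective: faster
-- what changed: Replaces A's per-character stateful scan with accumulator/flush logic by a recursive decomposition: locate each newline with str.find, emit the row of the prefix slice, and recurse on the suffix after it.
import Mathlib
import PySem

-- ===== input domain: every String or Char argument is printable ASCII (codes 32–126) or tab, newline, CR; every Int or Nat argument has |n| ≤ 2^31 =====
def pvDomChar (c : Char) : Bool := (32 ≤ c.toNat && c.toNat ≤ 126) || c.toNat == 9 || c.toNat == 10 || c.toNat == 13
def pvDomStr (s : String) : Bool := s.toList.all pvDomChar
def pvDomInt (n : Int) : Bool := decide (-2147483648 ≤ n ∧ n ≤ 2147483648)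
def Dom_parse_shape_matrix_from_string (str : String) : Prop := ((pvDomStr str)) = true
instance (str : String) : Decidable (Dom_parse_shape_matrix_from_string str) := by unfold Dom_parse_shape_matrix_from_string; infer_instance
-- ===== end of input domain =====

-- B replaces A's per-character stateful scan by a recursion: find the first newline,
-- emit the prefix's row, recurse on the suffix after it (objective: faster, measured).

-- ===== PORT A =====
def parse_shape_matrix_from_string (str : String) : List (List Int) :=
  (str.toList.foldl (fun (st : List (List Int) × List Int) char =>
      if char = '\n' then (st.1 ++ [st.2], [])
      else if char = '0' then (st.1, st.2 ++ [(0 : Int)])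
      else if char = '1' then (st.1, st.2 ++ [(1 : Int)])
      else st)
    ([], [])).1

-- ===== PORT B =====
-- recursion of Source B on the code-point list: str.find("\n") → PySem.Chars.find,
-- str[:i] / str[i+1:] → PySem.List.slice (Chars-level, exact)
def pvAltGo (l : List Char) : List (List Int) :=
  let i := PySem.Chars.find l ['\n']
  if _h : i = -1 then []
  else [((PySem.List.slice l none (some i)).filter
            (fun c => PySem.Chars.isIn [c] "01".toList)).map
          (fun c => if c = '1' then (1 : Int) else 0)]
       ++ pvAltGo (PySem.List.slice l (some (i + 1)) none)
termination_by l.length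
decreasing_by
  have hinf : ['\n'] <:+: l := (PySem.Chars.find_ne_neg_one_iff l ['\n']).mp _h
  have hpos : 0 < l.length := by
    have := hinf.sublist.length_le; simpa using Nat.lt_of_lt_of_le (by norm_num) this
  have hge : (0:Int) ≤ i := by
    have h1 := PySem.Chars.neg_one_le_find l ['\n']; omega
  rw [PySem.List.slice_from l (a := i + 1) (by omega)]
  simp only [List.length_drop]
  omega

def parse_shape_matrix_from_string_alt (str : String) : List (List Int) :=
  pvAltGo str.toList

-- ===== PRECONDITION & SPEC =====
def Spec_parse_shape_matrix_from_string (str : String) (out : List (List Int)) : Prop := out = parse_shape_matrix_from_string_alt str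
instance (str : String) (out : List (List Int)) : Decidable (Spec_parse_shape_matrix_from_string str out) := by unfold Spec_parse_shape_matrix_from_string; infer_instance

-- ===== CLAIM (what is proved, stated in full; the proofs are below) =====
def Claim_equal_parse_shape_matrix_from_string : Prop := ∀ (str : String), Dom_parse_shape_matrix_from_string str → Spec_parse_shape_matrix_from_string str (parse_shape_matrix_from_string str)

-- ===== LEMMAS AND PROOFS =====

-- split on a single '\n' (proof-side model of the line structure)
def pvSplit1 : List Char → List (List Char)
  | [] => [[]]
  | c :: t => if c = '\n' then [] :: pvSplit1 t
              else match pvSplit1 t with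
                   | [] => [[c]]
                   | h :: r => (c :: h) :: r

lemma pvSplit1_ne_nil (l : List Char) : pvSplit1 l ≠ [] := by
  cases l with
  | nil => simp [pvSplit1]
  | cons c t =>
    simp only [pvSplit1]
    split_ifs
    · simp
    · cases h : pvSplit1 t <;> simp

def pvRow (line : List Char) : List Int :=
  (line.filter (fun c => PySem.Chars.isIn [c] "01".toList)).map
    (fun c => if c = '1' then (1 : Int) else 0)

def pvStep (st : List (List Int) × List Int) (char : Char) : List (List Int) × List Int :=
  if char = '\n' then (st.1 ++ [st.2], [])
  else if char = '0' then (st.1, st.2 ++ [(0 : Int)])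
  else if char = '1' then (st.1, st.2 ++ [(1 : Int)])
  else st

lemma pvIsIn01 (c : Char) : PySem.Chars.isIn [c] "01".toList = (c == '0' || c == '1') := by
  by_cases h0 : c = '0'
  · subst h0; decide
  by_cases h1 : c = '1'
  · subst h1; decide
  · have hrhs : (c == '0' || c == '1') = false := by
      simp [h0, h1]
    rw [hrhs, PySem.Chars.isIn_eq_false_iff]
    intro hin
    have hm := hin.sublist
    rw [List.singleton_sublist] at hm
    have h01 : ("01".toList) = ['0', '1'] := by decide
    rw [h01] at hm
    simp only [List.mem_cons, List.not_mem_nil, or_false] at hm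
    rcases hm with h | h <;> [exact h0 h; exact h1 h]

lemma pvRow_cons (c : Char) (h : List Char) :
    pvRow (c :: h) = (if c = '0' then [(0 : Int)] else if c = '1' then [(1 : Int)] else []) ++ pvRow h := by
  simp only [pvRow, List.filter_cons, pvIsIn01]
  by_cases h0 : c = '0' <;> by_cases h1 : c = '1' <;> simp [h0, h1]

-- A-side invariant: the fold from (res, cur) yields res ++ (cur-prefixed rows of pvSplit1 l, last dropped)
lemma pvFold_spec (l : List Char) (res : List (List Int)) (cur : List Int) :
    (l.foldl pvStep (res, cur)).1 =
      res ++ (match pvSplit1 l with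
              | [] => []
              | hd :: r => ((cur ++ pvRow hd) :: r.map pvRow).dropLast) := by
  induction l generalizing res cur with
  | nil => simp [pvSplit1, pvRow]
  | cons c t ih =>
    by_cases hc : c = '\n'
    · subst hc
      simp only [List.foldl_cons]
      rw [show pvStep (res, cur) '\n' = (res ++ [cur], []) from by simp [pvStep]]
      rw [ih (res ++ [cur]) []]
      cases hs : pvSplit1 t with
      | nil => exact absurd hs (pvSplit1_ne_nil t)
      | cons hd r =>
        simp [pvSplit1, hs, pvRow]
    · have step : pvStep (res, cur) c =
          (res, cur ++ (if c = '0' then [(0 : Int)] else if c = '1' then [(1 : Int)] else [])) := by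
        by_cases h0 : c = '0' <;> by_cases h1 : c = '1' <;> simp_all [pvStep]
      simp only [List.foldl_cons, step]
      rw [ih]
      cases hs : pvSplit1 t with
      | nil => exact absurd hs (pvSplit1_ne_nil t)
      | cons hd r =>
        simp [pvSplit1, hc, hs, pvRow_cons, List.append_assoc]

-- pvSplit1 on a newline-free list
lemma pvSplit1_no_nl (l : List Char) (h : '\n' ∉ l) : pvSplit1 l = [l] := by
  induction l with
  | nil => rfl
  | cons c t ih =>
    have hc : c ≠ '\n' := fun e => h (e ▸ List.mem_cons_self)
    have ht : '\n' ∉ t := fun e => h (List.mem_cons_of_mem _ e)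
    simp [pvSplit1, hc, ih ht]

-- pvSplit1 splits at the first newline
lemma pvSplit1_first_nl (i : Nat) (l : List Char)
    (h1 : l[i]? = some '\n') (h2 : ∀ j, j < i → l[j]? ≠ some '\n') :
    pvSplit1 l = l.take i :: pvSplit1 (l.drop (i + 1)) := by
  induction i generalizing l with
  | zero =>
    cases l with
    | nil => simp at h1
    | cons c t =>
      simp only [List.getElem?_cons_zero, Option.some.injEq] at h1
      subst h1
      simp [pvSplit1]
  | succ n ih =>
    cases l with
    | nil => simp at h1
    | cons c t =>
      have hc : c ≠ '\n' := by
        have := h2 0 (Nat.succ_pos n); simpa using this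
      have ht1 : t[n]? = some '\n' := by simpa using h1
      have ht2 : ∀ j, j < n → t[j]? ≠ some '\n' := by
        intro j hj hcon
        exact h2 (j + 1) (by omega) (by simpa using hcon)
      simp only [pvSplit1, if_neg hc, ih t ht1 ht2]
      simp

-- B equals the rows of pvSplit1 with the trailing segment dropped
lemma pvAltGo_spec (l : List Char) :
    pvAltGo l = ((pvSplit1 l).map pvRow).dropLast := by
  induction hn : l.length using Nat.strong_induction_on generalizing l with
  | _ n ih =>
  rw [pvAltGo]
  by_cases h : PySem.Chars.find l ['\n'] = -1
  · have hni : ¬ ['\n'] <:+: l := (PySem.Chars.find_eq_neg_one_iff l ['\n']).mp h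
    have hmem : '\n' ∉ l := by
      intro hm
      rcases List.append_of_mem hm with ⟨a, b, rfl⟩
      exact hni ⟨a, b, by simp⟩
    rw [pvSplit1_no_nl l hmem]
    simp [h]
  · have hinf : ['\n'] <:+: l := (PySem.Chars.find_ne_neg_one_iff l ['\n']).mp h
    have hge : (0:Int) ≤ PySem.Chars.find l ['\n'] := by
      have := PySem.Chars.neg_one_le_find l ['\n']; omega
    set iZ := PySem.Chars.find l ['\n'] with hiZ
    set i := iZ.toNat with hi
    have hspec := PySem.Chars.findFrom_natCast_spec l ['\n'] 0 (Nat.zero_le _) (by simpa using h)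
    simp only [Nat.cast_zero, PySem.Chars.findFrom_zero] at hspec
    obtain ⟨-, hpre, hmin⟩ := hspec
    obtain ⟨s, hs⟩ := hpre
    have hs' : l.drop i = '\n' :: s := hs.symm
    have hget : l[i]? = some '\n' := by
      have h0 := List.getElem?_drop (xs := l) (i := i) (j := 0)
      rw [hs'] at h0
      simpa using h0.symm
    have hbefore : ∀ j, j < i → l[j]? ≠ some '\n' := by
      intro j hj hcon
      have hjlen : j < l.length := (List.getElem?_eq_some_iff.mp hcon).1
      apply hmin j (Nat.zero_le _) hj
      refine ⟨l.drop (j+1), ?_⟩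
      have hv : l[j] = '\n' := by
        rw [List.getElem?_eq_getElem hjlen] at hcon
        simpa using hcon
      rw [← hv]
      exact List.getElem_cons_drop hjlen
    have hsplit := pvSplit1_first_nl i l hget hbefore
    have hlenpos : 0 < l.length := by
      have := hinf.sublist.length_le; simpa using Nat.lt_of_lt_of_le (by norm_num) this
    have hslice1 : PySem.List.slice l none (some iZ) = l.take i := by
      rw [PySem.List.slice_to l hge]
    have hslice2 : PySem.List.slice l (some (iZ + 1)) none = l.drop (i + 1) := by
      rw [PySem.List.slice_from l (a := iZ + 1) (by omega)]
      congr 1; omega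
    have hrec := ih (l.drop (i+1)).length (by simp [List.length_drop]; omega) (l.drop (i+1)) rfl
    rw [dif_neg h, hslice1, hslice2, hrec, hsplit]
    have hne : pvSplit1 (l.drop (i+1)) ≠ [] := pvSplit1_ne_nil _
    cases hs : pvSplit1 (l.drop (i+1)) with
    | nil => exact absurd hs hne
    | cons hd r => simp [pvRow]

-- ===== VERDICT (by name: the statement is the Claim_ definition above) =====
theorem parse_shape_matrix_from_string_spec : Claim_equal_parse_shape_matrix_from_string := by
  intro str _
  unfold Spec_parse_shape_matrix_from_string parse_shape_matrix_from_string parse_shape_matrix_from_string_alt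
  have hA := pvFold_spec str.toList [] []
  have hfun : (fun (st : List (List Int) × List Int) char =>
      if char = '\n' then (st.1 ++ [st.2], ([] : List Int))
      else if char = '0' then (st.1, st.2 ++ [(0 : Int)])
      else if char = '1' then (st.1, st.2 ++ [(1 : Int)])
      else st) = pvStep := by
    funext st c; simp [pvStep]
  rw [hfun, hA, pvAltGo_spec]
  cases hs : pvSplit1 str.toList with
  | nil => exact absurd hs (pvSplit1_ne_nil str.toList)
  | cons hd r => simp
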